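-- pv_equiv track=rewrite | github.com/athrvakulkarni11/newgate-2 | organization_searcher.py | _parse_news_section
-- ===== SOURCE A (Python) =====
-- from typing import Dict, List, Optional
--
-- def _parse_news_section(section: str) -> List[Dict]:
--     """Parse news section"""
--     news_items = []
--     current_news = {}
--
--     for line in section.split('\n'):
--         line = line.strip()
--         if not line:
--             continue
--
--         if line.startswith('Title:'):
--             if current_news:
--                 news_items.append(current_news)
--             current_news = {'title': line.replace('Title:', '').strip()}
--         elif line.startswith('Date:'):
--             current_news['publication_date'] = line.replace('Date:', '').strip()
--         elif line.startswith('Summary:'):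
--             current_news['content'] = line.replace('Summary:', '').strip()
--         elif line.startswith('Source:'):
--             current_news['source_url'] = line.replace('Source:', '').strip()
--
--     if current_news:  # Add the last news item
--         news_items.append(current_news)
--
--     return news_items
-- ===== SOURCE B (Python) =====
-- from typing import Dict, List
--
-- _PREFIXES = [('Title:', 'title'), ('Date:', 'publication_date'),
--              ('Summary:', 'content'), ('Source:', 'source_url')]
--
-- def _parse_news_section(section: str) -> List[Dict]:
--     """Parse news section: group stripped lines into Title-blocks, then build a dict per block."""
--     stripped = [l.strip() for l in section.split('\n')]
--     lines = [l for l in stripped if l]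
--     # Phase 1: group lines into blocks; a new block starts at every 'Title:' line.
--     blocks = []
--     current = []
--     for line in lines:
--         if line.startswith('Title:'):
--             blocks.append(current)
--             current = [line]
--         else:
--             current.append(line)
--     blocks.append(current)
--     # Phase 2: build a dict per block by prefix dispatch; keep it only if non-empty.
--     result = []
--     for block in blocks:
--         d = {}
--         for line in block:
--             for prefix, key in _PREFIXES:
--                 if line.startswith(prefix):
--                     d[key] = line.replace(prefix, '').strip()
--                     break
--         if d:
--             result.append(d)
--     return result
-- ===== Notes on version B (the rewrite author's own statement) =====
-- stated objective: alternative
-- what changed: Replaces A's single stateful pass (mutable current dict flushed on each Title line) with a two-phase pipeline: strip/filter the lines, group them into Title-delimited blocks, then build each block's dict by dispatching on a prefix table and keep it only if non-empty.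
import Mathlib
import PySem

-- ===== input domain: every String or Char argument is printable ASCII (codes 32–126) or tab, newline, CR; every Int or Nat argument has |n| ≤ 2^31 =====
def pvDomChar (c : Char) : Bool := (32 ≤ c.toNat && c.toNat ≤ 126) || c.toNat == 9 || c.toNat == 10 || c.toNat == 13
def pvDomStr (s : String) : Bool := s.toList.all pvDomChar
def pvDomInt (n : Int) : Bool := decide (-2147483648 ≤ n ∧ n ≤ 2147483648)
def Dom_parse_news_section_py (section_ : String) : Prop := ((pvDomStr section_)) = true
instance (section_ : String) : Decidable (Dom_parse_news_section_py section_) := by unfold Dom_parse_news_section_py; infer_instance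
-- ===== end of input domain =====

-- B re-decomposes A's single stateful pass into strip/filter, Title-block grouping, and per-block dict building (alternative decomposition, same cost).

-- ===== PORT A =====
-- one iteration of A's loop: strip, skip blanks, then the Title/Date/Summary/Source elif chain
def pvStepA (st : List (List (String × String)) × PySem.Dict String String) (line0 : String) :
    List (List (String × String)) × PySem.Dict String String :=
  let line := PySem.Str.strip line0
  if line = "" then st
  else if PySem.Str.startswith line "Title:" = true then
    (if st.2.items ≠ [] then st.1 ++ [st.2.items] else st.1,
     PySem.Dict.insert ⟨[]⟩ "title" (PySem.Str.strip (PySem.Str.replace line "Title:" "")))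
  else if PySem.Str.startswith line "Date:" = true then
    (st.1, PySem.Dict.insert st.2 "publication_date" (PySem.Str.strip (PySem.Str.replace line "Date:" "")))
  else if PySem.Str.startswith line "Summary:" = true then
    (st.1, PySem.Dict.insert st.2 "content" (PySem.Str.strip (PySem.Str.replace line "Summary:" "")))
  else if PySem.Str.startswith line "Source:" = true then
    (st.1, PySem.Dict.insert st.2 "source_url" (PySem.Str.strip (PySem.Str.replace line "Source:" "")))
  else st

def parse_news_section_py (section_ : String) : List (List (String × String)) :=
  let st := ((PySem.Str.split? section_ "\n").getD []).foldl pvStepA ([], ⟨[]⟩)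
  if st.2.items ≠ [] then st.1 ++ [st.2.items] else st.1

-- ===== PORT B =====
def pvPrefixes : List (String × String) :=
  [("Title:", "title"), ("Date:", "publication_date"), ("Summary:", "content"), ("Source:", "source_url")]

-- the inner 'for prefix, key in _PREFIXES: … break' loop
def pvDispatch (d : PySem.Dict String String) (line : String) :
    List (String × String) → PySem.Dict String String
  | [] => d
  | (pfx, key) :: rest =>
    if PySem.Str.startswith line pfx = true then
      PySem.Dict.insert d key (PySem.Str.strip (PySem.Str.replace line pfx ""))
    else pvDispatch d line rest

def pvBuildDict (block : List String) : PySem.Dict String String :=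
  block.foldl (fun d line => pvDispatch d line pvPrefixes) ⟨[]⟩

-- one iteration of the grouping loop
def pvStepG (st : List (List String) × List String) (line : String) :
    List (List String) × List String :=
  if PySem.Str.startswith line "Title:" = true then (st.1 ++ [st.2], [line])
  else (st.1, st.2 ++ [line])

def parse_news_section_py_alt (section_ : String) : List (List (String × String)) :=
  let stripped := ((PySem.Str.split? section_ "\n").getD []).map PySem.Str.strip
  let lines := stripped.filter (fun l => l ≠ "")
  let st := lines.foldl pvStepG ([], [])
  let blocks := st.1 ++ [st.2]
  blocks.foldl (fun res b => let d := pvBuildDict b; if d.items ≠ [] then res ++ [d.items] else res) []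

-- ===== PRECONDITION & SPEC =====
def Spec_parse_news_section_py (section_ : String) (out : List (List (String × String))) : Prop := out = parse_news_section_py_alt section_
instance (section_ : String) (out : List (List (String × String))) : Decidable (Spec_parse_news_section_py section_ out) := by unfold Spec_parse_news_section_py; infer_instance

-- ===== CLAIM (what is proved, stated in full; the proofs are below) =====
def Claim_equal_parse_news_section_py : Prop := ∀ (section_ : String), Dom_parse_news_section_py section_ → Spec_parse_news_section_py section_ (parse_news_section_py section_)

-- ===== LEMMAS AND PROOFS =====

-- A's core step on an already-stripped, non-blank line
def pvCoreA (st : List (List (String × String)) × PySem.Dict String String) (line : String) :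
    List (List (String × String)) × PySem.Dict String String :=
  if PySem.Str.startswith line "Title:" = true then
    (if st.2.items ≠ [] then st.1 ++ [st.2.items] else st.1,
     PySem.Dict.insert ⟨[]⟩ "title" (PySem.Str.strip (PySem.Str.replace line "Title:" "")))
  else if PySem.Str.startswith line "Date:" = true then
    (st.1, PySem.Dict.insert st.2 "publication_date" (PySem.Str.strip (PySem.Str.replace line "Date:" "")))
  else if PySem.Str.startswith line "Summary:" = true then
    (st.1, PySem.Dict.insert st.2 "content" (PySem.Str.strip (PySem.Str.replace line "Summary:" "")))
  else if PySem.Str.startswith line "Source:" = true then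
    (st.1, PySem.Dict.insert st.2 "source_url" (PySem.Str.strip (PySem.Str.replace line "Source:" "")))
  else st

-- B's block-collecting step
def pvProc (blocks : List (List String)) : List (List (String × String)) :=
  blocks.foldl (fun res b => let d := pvBuildDict b; if d.items ≠ [] then res ++ [d.items] else res) []

lemma pvFoldA_eq (raws : List String) (st : List (List (String × String)) × PySem.Dict String String) :
    raws.foldl pvStepA st =
      ((raws.map PySem.Str.strip).filter (fun l => l ≠ "")).foldl pvCoreA st := by
  rw [List.foldl_filter, List.foldl_map]
  refine List.foldl_ext _ _ st (fun st' raw _ => ?_)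
  by_cases h : PySem.Str.strip raw = "" <;> simp [pvStepA, pvCoreA, h]

lemma pvProc_append (blocks : List (List String)) (b : List String) :
    pvProc (blocks ++ [b]) =
      if (pvBuildDict b).items ≠ [] then pvProc blocks ++ [(pvBuildDict b).items] else pvProc blocks := by
  simp [pvProc, List.foldl_append]

lemma pvBuildDict_append (block : List String) (line : String) :
    pvBuildDict (block ++ [line]) = pvDispatch (pvBuildDict block) line pvPrefixes := by
  simp [pvBuildDict, List.foldl_append]

lemma pvCoreA_dispatch (st : List (List (String × String)) × PySem.Dict String String)
    (line : String) (hT : PySem.Str.startswith line "Title:" = false) :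
    pvCoreA st line = (st.1, pvDispatch st.2 line pvPrefixes) := by
  simp at hT
  simp only [pvCoreA, pvDispatch, pvPrefixes, PySem.Str.startswith_eq]
  split_ifs <;> simp_all

lemma pvCoreA_title (st : List (List (String × String)) × PySem.Dict String String)
    (line : String) (hT : PySem.Str.startswith line "Title:" = true) :
    pvCoreA st line =
      (if st.2.items ≠ [] then st.1 ++ [st.2.items] else st.1, pvDispatch ⟨[]⟩ line pvPrefixes) := by
  simp at hT
  simp [pvCoreA, pvDispatch, pvPrefixes, hT]

lemma pvMain (lines : List String) :
    ∀ (blocks : List (List String)) (curB : List String),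
      (let st := lines.foldl pvCoreA (pvProc blocks, pvBuildDict curB);
       if st.2.items ≠ [] then st.1 ++ [st.2.items] else st.1)
      = pvProc ((lines.foldl pvStepG (blocks, curB)).1 ++ [(lines.foldl pvStepG (blocks, curB)).2]) := by
  induction lines with
  | nil =>
    intro blocks curB
    simp [pvProc_append]
  | cons line rest ih =>
    intro blocks curB
    by_cases hT : PySem.Str.startswith line "Title:" = true
    · have h1 : pvCoreA (pvProc blocks, pvBuildDict curB) line
          = (pvProc (blocks ++ [curB]), pvBuildDict [line]) := by
        rw [pvCoreA_title _ _ hT, pvProc_append]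
        simp [pvBuildDict, pvProc]
      have h2 : pvStepG (blocks, curB) line = (blocks ++ [curB], [line]) := by
        simp at hT
        simp [pvStepG, hT]
      simpa [h1, h2] using ih (blocks ++ [curB]) [line]
    · have hT' : PySem.Str.startswith line "Title:" = false := by
        simpa using hT
      have h1 : pvCoreA (pvProc blocks, pvBuildDict curB) line
          = (pvProc blocks, pvBuildDict (curB ++ [line])) := by
        rw [pvCoreA_dispatch _ _ hT', pvBuildDict_append]
      have h2 : pvStepG (blocks, curB) line = (blocks, curB ++ [line]) := by
        simp at hT'
        simp [pvStepG, hT']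
      simpa [h1, h2] using ih blocks (curB ++ [line])

-- ===== VERDICT (by name: the statement is the Claim_ definition above) =====
theorem parse_news_section_py_spec : Claim_equal_parse_news_section_py := by
  intro section_ _
  unfold Spec_parse_news_section_py parse_news_section_py parse_news_section_py_alt
  rw [pvFoldA_eq]
  have := pvMain ((((PySem.Str.split? section_ "\n").getD []).map PySem.Str.strip).filter (fun l => l ≠ "")) [] []
  simpa [pvProc, pvBuildDict] using this
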